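-- pv_equiv track=rewrite | github.com/josineidess/games-rpg | beco.py | beco
-- ===== SOURCE A (Python) =====
-- def beco(palavra):
--   variavel = ''
--   quant = len(palavra)
--   espacos = 0
--   letra = palavra[0]
--   for e in palavra:
--     variavel += (letra*espacos)
--     variavel += e
--     espacos+=1
--     variavel+= (letra*(quant - espacos))
--     variavel += '\n'
--   return variavel
-- ===== SOURCE B (Python) =====
-- def beco(palavra):
--     letra = palavra[0]
--     n = len(palavra)
--     grid = [[letra] * n for _ in range(n)]
--     for i in range(n):
--         grid[i][i] = palavra[i]
--     return ''.join(''.join(row) + '\n' for row in grid)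
-- ===== Notes on version B (the rewrite author's own statement) =====
-- stated objective: alternative
-- what changed: Replaces incremental per-position string concatenation with a two-pass matrix build: fill an n-by-n grid with the first letter, overwrite the diagonal, then join rows.
import Mathlib
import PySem

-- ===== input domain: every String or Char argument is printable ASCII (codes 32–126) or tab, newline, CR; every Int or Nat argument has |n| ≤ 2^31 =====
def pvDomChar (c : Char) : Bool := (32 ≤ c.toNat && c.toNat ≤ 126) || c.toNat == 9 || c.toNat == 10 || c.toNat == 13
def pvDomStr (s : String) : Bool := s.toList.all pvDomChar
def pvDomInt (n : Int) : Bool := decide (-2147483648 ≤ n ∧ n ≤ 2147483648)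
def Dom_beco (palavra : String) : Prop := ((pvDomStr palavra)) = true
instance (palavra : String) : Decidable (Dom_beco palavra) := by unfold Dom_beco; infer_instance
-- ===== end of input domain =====

-- B replaces A's incremental per-row string concatenation with a two-pass matrix build
-- (fill an n×n grid with the first letter, overwrite the diagonal, join the rows): alternative decomposition, same cost.


-- ===== PORT A =====
def beco (palavra : String) : String :=
  let cs := palavra.toList
  match cs with
  | [] => ""          -- Python raises IndexError on palavra[0]; excluded by Pre_beco
  | letra :: _ =>
    let quant := cs.length
    String.mk ((cs.foldl (fun (st : List Char × Nat) e =>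
      (st.1 ++ List.replicate st.2 letra ++ [e] ++
        List.replicate (quant - (st.2 + 1)) letra ++ ['\n'], st.2 + 1)) ([], 0)).1)

-- ===== PORT B =====
def beco_alt (palavra : String) : String :=
  let cs := palavra.toList
  match cs with
  | [] => ""          -- Python raises IndexError on palavra[0]; excluded by Pre_beco
  | letra :: _ =>
    let n := cs.length
    let grid := List.replicate n (List.replicate n letra)
    let grid2 := (List.range n).foldl
      (fun g i => g.set i ((g.getD i []).set i (cs.getD i letra))) grid
    String.mk (grid2.flatMap (fun row => row ++ ['\n']))

-- ===== PRECONDITION & SPEC =====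
-- Pre_ excludes only the empty string, on which A raises IndexError (palavra[0]).
def Pre_beco (palavra : String) : Prop := palavra ≠ ""
instance (palavra : String) : Decidable (Pre_beco palavra) := by unfold Pre_beco; infer_instance
def pvWitness_beco : String := "ab"

def Spec_beco (palavra : String) (out : String) : Prop := out = beco_alt palavra
instance (palavra : String) (out : String) : Decidable (Spec_beco palavra out) := by unfold Spec_beco; infer_instance

-- ===== CLAIM (what is proved, stated in full; the proofs are below) =====
def Claim_equal_beco : Prop := ∀ (palavra : String), Dom_beco palavra → Pre_beco palavra → Spec_beco palavra (beco palavra)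

-- ===== LEMMAS AND PROOFS =====

/-- The list of characters A's loop appends for the suffix `t`, starting at counter `esp`. -/
def rowsA (q : Nat) (letra : Char) : List Char → Nat → List Char
  | [], _ => []
  | e :: t, esp =>
      (List.replicate esp letra ++ e ::
        (List.replicate (q - (esp + 1)) letra ++ ['\n'])) ++ rowsA q letra t (esp + 1)

theorem foldlA_eq_rowsA (q : Nat) (letra : Char) :
    ∀ (t : List Char) (v : List Char) (esp : Nat),
      (t.foldl (fun (st : List Char × Nat) e =>
        (st.1 ++ List.replicate st.2 letra ++ [e] ++
          List.replicate (q - (st.2 + 1)) letra ++ ['\n'], st.2 + 1)) (v, esp)).1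
      = v ++ rowsA q letra t esp := by
  intro t
  induction t with
  | nil => intro v esp; simp [rowsA]
  | cons e t ih =>
      intro v esp
      simp only [List.foldl_cons, rowsA, ih]
      simp

theorem set_replicate (a b : Char) :
    ∀ (j q : Nat), j < q →
      (List.replicate q a).set j b
        = List.replicate j a ++ b :: List.replicate (q - (j + 1)) a := by
  intro j
  induction j with
  | zero =>
      intro q hq
      cases q with
      | zero => omega
      | succ q => simp [List.replicate_succ]
  | succ j ih =>
      intro q hq
      cases q with
      | zero => omega
      | succ q =>
          have h2 : q + 1 - (j + 1 + 1) = q - (j + 1) := by omega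
          simp only [List.replicate_succ, List.set_cons_succ, List.cons_append, h2]
          rw [ih q (by omega)]

/-- Characterisation of B's diagonal-overwrite fold after `k` steps. -/
theorem foldB_eq_map (cs : List Char) (letra : Char) :
    ∀ (k : Nat), k ≤ cs.length →
      (List.range k).foldl
        (fun g i => g.set i ((g.getD i []).set i (cs.getD i letra)))
        (List.replicate cs.length (List.replicate cs.length letra))
      = (List.range cs.length).map (fun j =>
          if j < k then (List.replicate cs.length letra).set j (cs.getD j letra)
          else List.replicate cs.length letra) := by
  intro k
  induction k with
  | zero =>
      intro _
      simp [List.map_const']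
  | succ k ih =>
      intro hk
      rw [List.range_succ, List.foldl_append, ih (by omega)]
      simp only [List.foldl_cons, List.foldl_nil]
      have hgetD : ((List.range cs.length).map (fun j =>
          if j < k then (List.replicate cs.length letra).set j (cs.getD j letra)
          else List.replicate cs.length letra)).getD k []
          = List.replicate cs.length letra := by
        rw [PySem.List.getD_map_range _ _ _ _ (by omega)]
        simp
      rw [hgetD]
      apply List.ext_getElem
      · simp
      · intro j h1 h2
        rw [List.getElem_set]
        simp only [List.getElem_map, List.getElem_range] at *
        by_cases hjk : k = j
        · subst hjk; simp
        · simp only [if_neg hjk]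
          by_cases hlt : j < k
          · simp [hlt, Nat.lt_succ_of_lt hlt]
          · have : ¬ j < k + 1 := by omega
            simp [hlt, this]

theorem rowsA_eq_flatten (cs : List Char) (letra : Char) :
    ∀ (t : List Char) (esp : Nat), esp + t.length = cs.length → t = cs.drop esp →
      rowsA cs.length letra t esp
      = ((List.range' esp t.length).map (fun j =>
          ((List.replicate cs.length letra).set j (cs.getD j letra)) ++ ['\n'])).flatten := by
  intro t
  induction t with
  | nil => intro esp _ _; simp [rowsA]
  | cons e t ih =>
      intro esp hlen hdrop
      have hesp : esp < cs.length := by simp at hlen; omega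
      have hget : cs.getD esp letra = e := by
        have h0 : cs[esp]? = some e := by
          have h1 : (cs.drop esp)[0]? = cs[esp + 0]? := List.getElem?_drop
          rw [← hdrop] at h1
          simpa using h1.symm
        simp [List.getD_eq_getElem?_getD, h0]
      have htail : t = cs.drop (esp + 1) := by
        have : cs.drop (esp + 1) = (cs.drop esp).drop 1 := by
          rw [List.drop_drop]
        rw [this, ← hdrop]
        simp
      simp only [List.length_cons, List.range'_succ, List.map_cons, List.flatten_cons]
      rw [← ih (esp + 1) (by simp at hlen ⊢; omega) htail]
      rw [hget, set_replicate letra e esp cs.length hesp]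
      simp [rowsA]

theorem beco_eq_alt (palavra : String) : beco palavra = beco_alt palavra := by
  unfold beco beco_alt
  cases h : palavra.toList with
  | nil => rfl
  | cons letra rest =>
      simp only []
      congr 1
      rw [foldlA_eq_rowsA, List.nil_append]
      rw [foldB_eq_map (letra :: rest) letra (letra :: rest).length (le_refl _)]
      have hmap : ((List.range (letra :: rest).length).map (fun j =>
          if j < (letra :: rest).length
          then (List.replicate (letra :: rest).length letra).set j ((letra :: rest).getD j letra)
          else List.replicate (letra :: rest).length letra))
          = (List.range (letra :: rest).length).map (fun j =>
            (List.replicate (letra :: rest).length letra).set j ((letra :: rest).getD j letra)) := by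
        apply List.map_congr_left
        intro j hj
        rw [List.mem_range] at hj
        rw [if_pos hj]
      rw [hmap]
      rw [rowsA_eq_flatten (letra :: rest) letra (letra :: rest) 0 (by simp) (by simp)]
      rw [List.flatMap_def, List.map_map]
      rw [List.range_eq_range']
      rfl

-- ===== VERDICT (by name: the statement is the Claim_ definition above) =====
theorem beco_spec : Claim_equal_beco := by
  intro palavra _ _
  unfold Spec_beco
  exact beco_eq_alt palavra
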